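-- pv_equiv track=rewrite | github.com/dennisrm/slugplot | upset.py | intersection_sizes
-- ===== SOURCE A (Python) =====
-- def intersection_sizes(category_dict):
--     """Parse elements from categories to determine numbers of overlapping elements"""
--     matches = {}
--     for category,elements in category_dict.items():
--         for element in elements:
--             if element in matches:
--                 matches[element].append(category)
--             else:
--                 matches[element] = [category]
--     intersections = {}
--     for element,group in matches.items():
--         group = tuple(sorted(set(group)))
--         try:
--             intersections[group].append(element)
--         except KeyError:
--             intersections[group] = [element]
--     return {group:len(elements) for group,elements in intersections.items()}
-- ===== SOURCE B (Python) =====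
-- def intersection_sizes(category_dict):
--     """Parse elements from categories to determine numbers of overlapping elements"""
--     elements = list(dict.fromkeys(e for els in category_dict.values() for e in els))
--     counts = {}
--     for e in elements:
--         sig = tuple(sorted({c for c, els in category_dict.items() if e in els}))
--         counts[sig] = counts.get(sig, 0) + 1
--     return counts
-- ===== Notes on version B (the rewrite author's own statement) =====
-- stated objective: alternative
-- what changed: Instead of accumulating an element-to-categories dict and then a signature-to-elements dict of lists, B dedups the flattened element stream with dict.fromkeys and, per element, computes its signature directly by a membership scan over the categories, tallying signatures in a plain counting dict; this trades A's single-pass accumulation for per-element rescans (slower on large inputs).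
import Mathlib
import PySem

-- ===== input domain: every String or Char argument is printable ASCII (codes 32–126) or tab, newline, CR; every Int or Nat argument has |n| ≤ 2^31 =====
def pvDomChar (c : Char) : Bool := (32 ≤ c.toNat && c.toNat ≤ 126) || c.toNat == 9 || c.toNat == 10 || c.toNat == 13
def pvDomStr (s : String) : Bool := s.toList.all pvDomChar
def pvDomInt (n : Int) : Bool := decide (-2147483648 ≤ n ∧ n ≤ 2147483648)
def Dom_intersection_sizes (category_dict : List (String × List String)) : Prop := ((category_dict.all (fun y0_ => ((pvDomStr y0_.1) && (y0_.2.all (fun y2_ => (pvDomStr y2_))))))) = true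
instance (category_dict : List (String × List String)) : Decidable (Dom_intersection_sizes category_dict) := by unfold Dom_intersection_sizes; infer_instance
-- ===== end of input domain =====

-- B replaces A's two accumulated dicts (element→category-list, then signature→element-list)
-- by a dedup of the flattened element stream and a direct per-element membership scan that
-- tallies each signature in a counting dict (objective: alternative decomposition, not speed).

-- ===== PORT A =====
def intersection_sizes (category_dict : List (String × List String)) : List (List String × Int) :=
  let matchesMap : PySem.Dict String (List String) :=
    category_dict.foldl (fun m p =>
      p.2.foldl (fun m element =>
        if m.contains element then m.insert element (m.getD element [] ++ [p.1])
        else m.insert element [p.1]) m) PySem.Dict.empty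
  let intersections : PySem.Dict (List String) (List String) :=
    matchesMap.items.foldl (fun d q =>
      let group := PySem.List.sorted (PySem.Set.ofList q.2) (fun x => x) false
      match d.get? group with
      | some es => d.insert group (es ++ [q.1])
      | none => d.insert group [q.1]) PySem.Dict.empty
  intersections.items.map (fun q => (q.1, (q.2.length : Int)))

-- ===== PORT B =====
def intersection_sizes_alt (category_dict : List (String × List String)) : List (List String × Int) :=
  let elements := PySem.List.dedup (category_dict.flatMap (fun p => p.2))
  let counts : PySem.Dict (List String) Int :=
    elements.foldl (fun d e =>
      let sig := PySem.List.sorted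
        (PySem.Set.ofList ((category_dict.filter (fun p => p.2.contains e)).map (fun p => p.1)))
        (fun x => x) false
      d.insert sig (d.getD sig 0 + 1)) PySem.Dict.empty
  counts.items

-- ===== PRECONDITION & SPEC =====
def Spec_intersection_sizes (category_dict : List (String × List String)) (out : List (List String × Int)) : Prop := out = intersection_sizes_alt category_dict
instance (category_dict : List (String × List String)) (out : List (List String × Int)) : Decidable (Spec_intersection_sizes category_dict out) := by unfold Spec_intersection_sizes; infer_instance

-- ===== CLAIM (what is proved, stated in full; the proofs are below) =====
def Claim_equal_intersection_sizes : Prop := ∀ (category_dict : List (String × List String)), Dom_intersection_sizes category_dict → Spec_intersection_sizes category_dict (intersection_sizes category_dict)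

-- ===== LEMMAS AND PROOFS =====

-- the flattened (element, category) stream of A's first loop
def pvFlat (cd : List (String × List String)) : List (String × String) :=
  cd.flatMap (fun p => p.2.map (fun e => (e, p.1)))

-- the signature of an element, as B computes it
def pvSig (cd : List (String × List String)) (e : String) : List String :=
  PySem.List.sorted
    (PySem.Set.ofList ((cd.filter (fun p => p.2.contains e)).map (fun p => p.1)))
    (fun x => x) false

-- the nested loop over (category, elements) pairs is the loop over the flattened stream
lemma pv_foldl_nested {α : Type} (cd : List (String × List String))
    (g : α → String → String → α) (init : α) :
    cd.foldl (fun m p => p.2.foldl (fun m e => g m p.1 e) m) init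
      = (pvFlat cd).foldl (fun m q => g m q.2 q.1) init := by
  induction cd generalizing init with
  | nil => rfl
  | cons p tl ih =>
    simp only [List.foldl_cons, pvFlat, List.flatMap_cons, List.foldl_append, List.foldl_map]
    exact ih _

-- the grouping loop characterized: keys in first-occurrence order, values grouped in order
lemma pv_group_items {β κ ν : Type} [BEq κ] [LawfulBEq κ]
    (l : List β) (key : β → κ) (val : β → ν)
    {step : PySem.Dict κ (List ν) → β → PySem.Dict κ (List ν)}
    (hstep : ∀ d b, step d b = d.modify (key b) [] (· ++ [val b])) :
    (l.foldl step PySem.Dict.empty).items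
      = (PySem.Set.ofList (l.map key)).map
          (fun k => (k, (l.filter (fun b => key b == k)).map val)) := by
  have hfold : l.foldl step PySem.Dict.empty
      = (l.map (fun b => (key b, val b))).foldl
          (fun d p => d.modify p.1 [] (· ++ [p.2])) PySem.Dict.empty := by
    have h1 : l.foldl step PySem.Dict.empty
        = l.foldl (fun d b => d.modify (key b) [] (· ++ [val b])) PySem.Dict.empty := by
      congr 1; funext d b; exact hstep d b
    rw [h1]
    exact (List.foldl_map (f := fun b => (key b, val b))
      (g := fun (d : PySem.Dict κ (List ν)) p => d.modify p.1 [] (· ++ [p.2]))).symm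
  rw [hfold]
  set l2 := l.map (fun b => (key b, val b)) with hl2
  have hnd : (l2.foldl (fun d p => d.modify p.1 [] (· ++ [p.2])) PySem.Dict.empty).keys.Nodup :=
    PySem.Dict.nodup_keys_foldl_modify_key l2 (·.1) [] (fun d p => (· ++ [p.2])) _
      PySem.Dict.nodup_keys_empty
  rw [PySem.Dict.items_eq_map_keys _ hnd []]
  rw [PySem.Dict.keys_foldl_modify_key]
  have hkeys : l2.map (·.1) = l.map key := by
    simp [hl2, List.map_map, Function.comp_def]
  simp only [PySem.Dict.keys_empty, PySem.Set.update_nil_left, hkeys]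
  refine List.map_congr_left (fun k hk => ?_)
  rw [PySem.Dict.getD_foldl_modify_append]
  simp [hl2, PySem.Dict.getD_empty, List.filter_map, List.map_map, Function.comp_def]

-- both signature computations agree on every element
lemma pv_sig_eq (cd : List (String × List String)) (e : String) :
    PySem.List.sorted
      (PySem.Set.ofList (((pvFlat cd).filter (fun q => q.1 == e)).map (·.2)))
      (fun x => x) false = pvSig cd e := by
  unfold pvSig
  apply PySem.List.sorted_eq_sorted_of_perm _ _ _ (fun a b h => h)
  apply List.perm_of_nodup_nodup_toFinset_eq (PySem.Set.nodup_ofList _) (PySem.Set.nodup_ofList _)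
  ext c
  simp only [List.mem_toFinset, PySem.Set.mem_ofList, List.mem_map, List.mem_filter,
    pvFlat, List.mem_flatMap, beq_iff_eq, List.contains_iff_mem]
  constructor
  · rintro ⟨q, ⟨⟨p, hp, e', he', rfl⟩, h1⟩, rfl⟩
    exact ⟨p, ⟨hp, h1 ▸ he'⟩, rfl⟩
  · rintro ⟨p, ⟨hp, he⟩, rfl⟩
    exact ⟨(e, p.1), ⟨⟨p, hp, e, he, rfl⟩, rfl⟩, rfl⟩

lemma pv_flat_fst (cd : List (String × List String)) :
    (pvFlat cd).map (·.1) = cd.flatMap (fun p => p.2) := by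
  simp [pvFlat, List.map_flatMap, Function.comp_def]

-- A's two loop steps coincide with the canonical grouping step
lemma pv_astep_eq {κ ν : Type} [BEq κ] [LawfulBEq κ] (d : PySem.Dict κ (List ν)) (q : κ × ν) :
    (if d.contains q.1 then d.insert q.1 (d.getD q.1 [] ++ [q.2]) else d.insert q.1 [q.2])
      = d.modify q.1 [] (· ++ [q.2]) := by
  have hm : d.modify q.1 [] (· ++ [q.2]) = d.insert q.1 (d.getD q.1 [] ++ [q.2]) := rfl
  by_cases h : d.contains q.1 = true
  · simp [h, hm]
  · have h0 : d.getD q.1 [] = [] := PySem.Dict.getD_of_not_contains _ _ (by simpa using h)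
    simp [h, hm, h0]

-- B in canonical form: signatures of the deduplicated element stream, tallied
lemma pv_B_eq (cd : List (String × List String)) :
    intersection_sizes_alt cd
      = (PySem.Set.ofList ((PySem.List.dedup (cd.flatMap (fun p => p.2))).map (pvSig cd))).map
          (fun k => (k, (((PySem.List.dedup (cd.flatMap (fun p => p.2))).map (pvSig cd)).count k : Int))) := by
  simp only [intersection_sizes_alt]
  show ((PySem.List.dedup (cd.flatMap (fun p => p.2))).foldl
      (fun d e => d.insert (pvSig cd e) (d.getD (pvSig cd e) (0:Int) + 1)) PySem.Dict.empty).items = _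
  rw [show (PySem.List.dedup (cd.flatMap (fun p => p.2))).foldl
        (fun d e => d.insert (pvSig cd e) (d.getD (pvSig cd e) (0:Int) + 1)) PySem.Dict.empty
      = ((PySem.List.dedup (cd.flatMap (fun p => p.2))).map (pvSig cd)).foldl
        (fun d x => d.insert x (d.getD x 0 + 1)) PySem.Dict.empty from (List.foldl_map (f := pvSig cd) (g := fun (d : PySem.Dict (List String) Int) x => d.insert x (d.getD x 0 + 1))).symm]
  rw [PySem.Dict.foldl_insert_getD_add_one_eq_counter, PySem.Dict.items_counter]

-- ===== VERDICT (by name: the statement is the Claim_ definition above) =====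
theorem intersection_sizes_spec : Claim_equal_intersection_sizes := by
  intro cd _
  show intersection_sizes cd = intersection_sizes_alt cd
  rw [pv_B_eq]
  simp only [intersection_sizes]
  rw [pv_foldl_nested cd
    (fun m c e => if m.contains e then m.insert e (m.getD e [] ++ [c]) else m.insert e [c])
    PySem.Dict.empty]
  rw [pv_group_items (pvFlat cd) (fun q => q.1) (fun q => q.2)
    (fun d q => pv_astep_eq d q)]
  rw [pv_group_items _ (fun q => PySem.List.sorted (PySem.Set.ofList q.2) (fun x => x) false)
    (fun q => q.1) (fun d q => by
      show _ = d.modify (PySem.List.sorted (PySem.Set.ofList q.2) (fun x => x) false) [] (· ++ [q.1])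
      have hm : d.modify (PySem.List.sorted (PySem.Set.ofList q.2) (fun x => x) false) [] (· ++ [q.1])
          = d.insert (PySem.List.sorted (PySem.Set.ofList q.2) (fun x => x) false)
              (d.getD (PySem.List.sorted (PySem.Set.ofList q.2) (fun x => x) false) [] ++ [q.1]) := rfl
      cases hg : d.get? (PySem.List.sorted (PySem.Set.ofList q.2) (fun x => x) false) <;>
        simp [hm, PySem.Dict.getD_eq_get?_getD, hg])]
  simp only [List.map_map, Function.comp_def, List.filter_map, pv_sig_eq,
    PySem.List.dedup_eq_ofList, ← pv_flat_fst, List.count_eq_countP,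
    List.countP_eq_length_filter, List.length_map]
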